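-- pv_equiv track=rewrite | github.com/4334zheng/ZHENGYANWEI | python/大作业1/pythonProject_Homework1/homework1_3.py | offByExtra
-- ===== SOURCE A (Python) =====
-- def offByExtra(str1, str2):
--     l1 = len(str1)
--     l2 = len(str2)
--     if l1 == l2+1:
--         for i in range(l1):
--             temp1 = str1[:]
--             temp1.pop(i)
--             if temp1 == str2:
--                 return True
--     if l2 == l1+1:
--         for i in range(l2):
--             temp2 = str2[:]
--             temp2.pop(i)
--             if temp2 == str1:
--                 return True
--     return False
-- ===== SOURCE B (Python) =====
-- def offByExtra(str1, str2):
--     if len(str1) == len(str2) + 1: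
--         longer, shorter = str1, str2
--     elif len(str2) == len(str1) + 1:
--         longer, shorter = str2, str1
--     else:
--         return False
--     i = 0
--     while i < len(shorter) and longer[i] == shorter[i]:
--         i += 1
--     return longer[i+1:] == shorter[i:]
-- ===== Notes on version B (the rewrite author's own statement) =====
-- stated objective: alternative
-- what changed: Replaced A's try-every-deletion scan (copy the list, pop index i, compare whole lists for each i) with a single two-pointer pass: advance past the common prefix, then compare the longer list's suffix after skipping one element.
import Mathlib
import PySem

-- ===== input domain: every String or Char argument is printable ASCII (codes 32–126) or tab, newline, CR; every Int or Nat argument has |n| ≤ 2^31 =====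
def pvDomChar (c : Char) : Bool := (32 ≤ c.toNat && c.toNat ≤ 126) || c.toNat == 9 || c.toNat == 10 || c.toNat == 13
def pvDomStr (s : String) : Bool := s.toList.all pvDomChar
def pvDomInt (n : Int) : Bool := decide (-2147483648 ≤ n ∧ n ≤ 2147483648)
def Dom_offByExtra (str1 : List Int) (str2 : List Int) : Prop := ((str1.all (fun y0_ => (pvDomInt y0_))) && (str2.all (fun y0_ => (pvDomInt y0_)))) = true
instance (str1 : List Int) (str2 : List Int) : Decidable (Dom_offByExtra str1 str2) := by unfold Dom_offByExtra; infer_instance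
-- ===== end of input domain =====

-- B replaces A's try-every-deletion scan with a single two-pointer pass (skip the
-- common prefix, then compare the longer list's suffix after dropping one element).

-- ===== PORT A =====
def offByExtra (str1 : List Int) (str2 : List Int) : Bool :=
  let l1 := str1.length
  let l2 := str2.length
  let first :=
    if l1 = l2 + 1 then
      (PySem.List.pyRange 0 (l1 : Int) 1).any (fun i =>
        match PySem.List.pop? str1 i with
        | some (_, rest) => rest == str2
        | none => false)
    else false
  if first then true
  else if l2 = l1 + 1 then
    (PySem.List.pyRange 0 (l2 : Int) 1).any (fun i =>
      match PySem.List.pop? str2 i with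
      | some (_, rest) => rest == str1
      | none => false)
  else false

-- ===== PORT B =====
-- Source B's while loop as structural recursion; the ([], _ :: _) case is unreachable under the
-- call-site invariant longer.length = shorter.length + 1.
def tpLoop : List Int → List Int → Bool
  | longer, [] => longer.drop 1 == []
  | [], _ :: _ => false
  | a :: xs, b :: ys => if a == b then tpLoop xs ys else xs == b :: ys

def offByExtra_alt (str1 : List Int) (str2 : List Int) : Bool :=
  if str1.length = str2.length + 1 then tpLoop str1 str2
  else if str2.length = str1.length + 1 then tpLoop str2 str1
  else false

-- ===== PRECONDITION & SPEC =====
def Spec_offByExtra (str1 : List Int) (str2 : List Int) (out : Bool) : Prop := out = offByExtra_alt str1 str2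
instance (str1 : List Int) (str2 : List Int) (out : Bool) : Decidable (Spec_offByExtra str1 str2 out) := by unfold Spec_offByExtra; infer_instance

-- ===== CLAIM (what is proved, stated in full; the proofs are below) =====
def Claim_equal_offByExtra : Prop := ∀ (str1 : List Int) (str2 : List Int), Dom_offByExtra str1 str2 → Spec_offByExtra str1 str2 (offByExtra str1 str2)

-- ===== LEMMAS AND PROOFS =====

-- the two-pointer loop accepts (c :: S, S) for any c
lemma tpLoop_cons_self (S : List Int) (c : Int) : tpLoop (c :: S) S = true := by
  induction S generalizing c with
  | nil => simp [tpLoop]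
  | cons d ys ih =>
    by_cases h : c = d
    · simp [tpLoop, h, ih]
    · simp [tpLoop, h]

-- A's deletion scan equals the two-pointer loop when the lengths differ by one
lemma anyErase_eq_tpLoop (L S : List Int) (h : L.length = S.length + 1) :
    (List.range L.length).any (fun i => L.eraseIdx i == S) = tpLoop L S := by
  induction L generalizing S with
  | nil => simp at h
  | cons a t ih =>
    cases S with
    | nil =>
      have ht : t = [] := by simpa using h
      subst ht; simp [tpLoop]
    | cons b u =>
      have ht : t.length = u.length + 1 := by simpa using h
      rw [show (a :: t).length = t.length + 1 from rfl, List.range_succ_eq_map,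
        List.any_cons, List.any_map]
      by_cases hab : a = b
      · subst hab
        have : (List.range t.length).any
            (fun i => (a :: t).eraseIdx (Nat.succ i) == a :: u)
            = (List.range t.length).any (fun i => t.eraseIdx i == u) := by
          refine PySem.List.any_congr_mem ?_
          intro i _
          simp [List.eraseIdx_cons_succ]
        rw [Function.comp_def, this, ih u ht]
        by_cases hcs : t = a :: u
        · simp [tpLoop, hcs, tpLoop_cons_self]
        · simp [tpLoop, hcs]
      · have : (List.range t.length).any
            (fun i => (a :: t).eraseIdx (Nat.succ i) == b :: u) = false := by
          simp [List.eraseIdx_cons_succ, hab]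
        rw [Function.comp_def, this]
        simp [tpLoop, hab]

-- A's loop body (copy + pop i + compare) equals the eraseIdx comparison on range indices
lemma anyA_eq_anyErase (L S : List Int) :
    ((PySem.List.pyRange 0 (L.length : Int) 1).any (fun i =>
      match PySem.List.pop? L i with
      | some (_, rest) => rest == S
      | none => false))
    = (List.range L.length).any (fun i => L.eraseIdx i == S) := by
  rw [PySem.List.pyRange_zero_natCast, List.any_map]
  refine PySem.List.any_congr_mem ?_
  intro i hi
  have hlt : i < L.length := List.mem_range.mp hi
  simp [Function.comp, PySem.List.pop?_natCast L i hlt]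

-- ===== VERDICT (by name: the statement is the Claim_ definition above) =====
theorem offByExtra_spec : Claim_equal_offByExtra := by
  intro s1 s2 _
  unfold Spec_offByExtra offByExtra offByExtra_alt
  dsimp only
  rw [anyA_eq_anyErase s1 s2, anyA_eq_anyErase s2 s1]
  by_cases h1 : s1.length = s2.length + 1
  · have h2 : ¬ s2.length = s1.length + 1 := by omega
    rw [if_pos h1, if_pos h1, if_neg h2, anyErase_eq_tpLoop s1 s2 h1]
    cases tpLoop s1 s2 <;> simp
  · rw [if_neg h1, if_neg h1, if_neg (by decide : ¬ (false = true))]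
    by_cases h2 : s2.length = s1.length + 1
    · rw [if_pos h2, if_pos h2, anyErase_eq_tpLoop s2 s1 h2]
    · rw [if_neg h2, if_neg h2]
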